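-- pv_equiv track=rewrite | github.com/Sujay2004-real/cyberguard-url-scanner | lexical.py | _detect_suspicious_extension
-- ===== SOURCE A (Python) =====
-- _SUSPICIOUS_PATH_EXT = frozenset(
--     {
--         ".exe",
--         ".scr",
--         ".bat",
--         ".cmd",
--         ".com",
--         ".pif",
--         ".jar",
--         ".apk",
--         ".dll",
--         ".msi",
--         ".ps1",
--         ".vbs",
--         ".js",
--         ".hta",
--     }
-- )
--
-- def _detect_suspicious_extension(path_lower: str) -> str | None:
--     path_only = path_lower.split("?")[0].split("#")[0]
--     last_seg = path_only.rsplit("/", 1)[-1]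
--     if not last_seg:
--         return None
--     for ext in sorted(_SUSPICIOUS_PATH_EXT, key=len, reverse=True):
--         if last_seg.endswith(ext):
--             return ext
--     return None
-- ===== SOURCE B (Python) =====
-- _SUSPICIOUS_PATH_EXT = frozenset(
--     {
--         ".exe",
--         ".scr",
--         ".bat",
--         ".cmd",
--         ".com",
--         ".pif",
--         ".jar",
--         ".apk",
--         ".dll",
--         ".msi",
--         ".ps1",
--         ".vbs",
--         ".js",
--         ".hta",
--     }
-- )
--
-- def _detect_suspicious_extension(path_lower: str) -> str | None:
--     # Single left-to-right pass: track the current segment length and the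
--     # extension accumulator (chars since the last '.'), resetting on '/'.
--     seg_len = 0
--     ext = None
--     for c in path_lower:
--         if c == "?" or c == "#":
--             break
--         if c == "/":
--             seg_len = 0
--             ext = None
--         else:
--             seg_len += 1
--             if c == ".":
--                 ext = "."
--             elif ext is not None:
--                 ext += c
--     if seg_len == 0 or ext is None:
--         return None
--     return ext if ext in _SUSPICIOUS_PATH_EXT else None
-- ===== Notes on version B (the rewrite author's own statement) =====
-- stated objective: alternative
-- what changed: B is a single left-to-right character scan maintaining a segment-length counter and an extension accumulator (reset on '/', break on '?'/'#'), then one set-membership test, instead of A's staged split('?')/split('#')/rsplit('/') passes followed by a 14-iteration longest-first endswith scan.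
import Mathlib
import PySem

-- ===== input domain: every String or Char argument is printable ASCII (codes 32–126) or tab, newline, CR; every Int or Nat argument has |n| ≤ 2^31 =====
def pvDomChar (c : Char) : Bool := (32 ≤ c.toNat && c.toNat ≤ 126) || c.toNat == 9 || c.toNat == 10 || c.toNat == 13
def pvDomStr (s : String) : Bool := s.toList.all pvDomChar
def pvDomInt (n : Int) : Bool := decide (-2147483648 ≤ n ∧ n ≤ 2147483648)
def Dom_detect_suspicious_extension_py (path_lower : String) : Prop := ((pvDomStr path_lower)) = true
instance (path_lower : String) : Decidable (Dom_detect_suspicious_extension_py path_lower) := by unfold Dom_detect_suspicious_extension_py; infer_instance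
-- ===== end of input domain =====

-- B replaces A's staged split/rsplit passes plus 14-iteration longest-first suffix scan
-- by one left-to-right character scan with a segment counter and an extension
-- accumulator, then a single set-membership test (objective: alternative).


-- ===== PORT A =====
-- last_seg = path_lower.split("?")[0].split("#")[0].rsplit("/", 1)[-1]
-- (split(sep) always yields a nonempty list, so [0] is its head — headD [] is exact;
--  rsplit("/", 1)[-1] is exactly the suffix after the last '/', ported by hand via reverse/takeWhile)
def pvLastSeg (path_lower : String) : List Char :=
  let path_only :=
    (PySem.Chars.splitOn ((PySem.Chars.splitOn path_lower.toList ['?']).headD []) ['#']).headD []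
  (path_only.reverse.takeWhile (fun c => c != '/')).reverse

-- _SUSPICIOUS_PATH_EXT as sorted(…, key=len, reverse=True): the length-4 extensions
-- first, then ".js"; the order among equal-length extensions (Python's hash order)
-- cannot affect the result, since two distinct same-length suffixes cannot both match.
def pvExts : List (List Char) :=
  [".exe", ".scr", ".bat", ".cmd", ".com", ".pif", ".jar", ".apk", ".dll", ".msi",
   ".ps1", ".vbs", ".hta", ".js"].map String.toList

def detect_suspicious_extension_py (path_lower : String) : Option String :=
  let last_seg := pvLastSeg path_lower
  if last_seg = [] then none
  else (pvExts.find? (fun e => PySem.Chars.endswith last_seg e)).map String.ofList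

-- ===== PORT B =====
-- the frozenset (membership only; iteration order never observed by B)
def pvExtsB : List (List Char) :=
  [".js", ".exe", ".dll", ".bat", ".cmd", ".com", ".scr", ".pif", ".jar", ".apk",
   ".msi", ".ps1", ".vbs", ".hta"].map String.toList

-- the for-loop of Source B: state (seg_len, ext); break on '?'/'#', reset on '/'
def pvAltLoop : List Char → Nat → Option (List Char) → Nat × Option (List Char)
  | [], n, e => (n, e)
  | c :: rest, n, e =>
    if c == '?' || c == '#' then (n, e)
    else if c == '/' then pvAltLoop rest 0 none
    else pvAltLoop rest (n + 1) (if c == '.' then some ['.'] else e.map (· ++ [c]))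

def detect_suspicious_extension_py_alt (path_lower : String) : Option String :=
  match pvAltLoop path_lower.toList 0 none with
  | (seg_len, ext) =>
    if seg_len = 0 then none
    else
      match ext with
      | none => none
      | some ex => if pvExtsB.contains ex then some (String.ofList ex) else none

-- ===== PRECONDITION & SPEC =====
def Spec_detect_suspicious_extension_py (path_lower : String) (out : Option String) : Prop := out = detect_suspicious_extension_py_alt path_lower
instance (path_lower : String) (out : Option String) : Decidable (Spec_detect_suspicious_extension_py path_lower out) := by unfold Spec_detect_suspicious_extension_py; infer_instance

-- ===== CLAIM (what is proved, stated in full; the proofs are below) =====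
def Claim_equal_detect_suspicious_extension_py : Prop := ∀ (path_lower : String), Dom_detect_suspicious_extension_py path_lower → Spec_detect_suspicious_extension_py path_lower (detect_suspicious_extension_py path_lower)

-- ===== LEMMAS AND PROOFS =====

-- ---- A-side characterisation (suffix scan = last-dot split + membership) ----

theorem pv_takeWhile_no_dot (w rest : List Char) (hw : '.' ∉ w) :
    (w ++ '.' :: rest).takeWhile (fun c => c != '.') = w := by
  induction w with
  | nil => simp
  | cons a t ih =>
    have ha : a ≠ '.' := fun h => hw (h ▸ List.mem_cons_self)
    simp only [List.cons_append, List.takeWhile_cons]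
    simp [ha, ih (fun h => hw (List.mem_cons_of_mem _ h))]

theorem pv_prefix_dot_iff (u w : List Char) (hw : '.' ∉ w) :
    (w ++ ['.']) <+: u ↔ '.' ∈ u ∧ u.takeWhile (fun c => c != '.') = w := by
  constructor
  · rintro ⟨rest, hrest⟩
    subst hrest
    refine ⟨by simp, ?_⟩
    rw [List.append_assoc, List.singleton_append]
    exact pv_takeWhile_no_dot w rest hw
  · rintro ⟨hmem, htw⟩
    have hsplit : u.takeWhile (fun c => c != '.') ++ u.dropWhile (fun c => c != '.') = u :=
      List.takeWhile_append_dropWhile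
    have hne : u.dropWhile (fun c => c != '.') ≠ [] := by
      intro h
      rw [← hsplit, h, List.append_nil] at hmem
      have := List.mem_takeWhile_imp hmem
      simp at this
    rcases List.exists_cons_of_ne_nil hne with ⟨c, t, hct⟩
    have hc : c = '.' := by
      have := List.head_dropWhile_not (p := fun c => c != '.') hne
      have h2 : (List.dropWhile (fun c => c != '.') u).head hne = c := by
        simp [hct]
      rw [h2] at this
      simpa using this
    refine ⟨t, ?_⟩
    rw [← hsplit, htw, hct, hc]
    simp

theorem pv_endswith_ext (seg r : List Char) (hr : '.' ∉ r) :
    PySem.Chars.endswith seg ('.' :: r) = true ↔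
      '.' ∈ seg ∧ (seg.reverse.takeWhile (fun c => c != '.')).reverse = r := by
  rw [PySem.Chars.endswith_iff]
  have h1 : ('.' :: r) <:+ seg ↔ ('.' :: r).reverse <+: seg.reverse := by
    rw [List.reverse_prefix]
  rw [h1]
  simp only [List.reverse_cons]
  rw [pv_prefix_dot_iff seg.reverse r.reverse (by simpa using hr)]
  constructor
  · rintro ⟨h, h2⟩
    exact ⟨by simpa using h, by rw [h2]; simp⟩
  · rintro ⟨h, h2⟩
    refine ⟨by simpa using h, ?_⟩
    rw [← h2]; simp

theorem pv_find?_beq (l : List (List Char)) (x : List Char) :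
    l.find? (fun e => x == e) = if l.contains x then some x else none := by
  induction l with
  | nil => simp
  | cons a t ih =>
    by_cases h : x = a
    · subst h; simp [List.find?]
    · have hb : (x == a) = false := beq_false_of_ne h
      simp [List.find?, hb, h, ih]

theorem pv_exts_shape : ∀ e ∈ pvExts, e.head? = some '.' ∧ '.' ∉ e.tail := by decide

theorem pv_find?_congr {α : Type} (l : List α) (p q : α → Bool) (h : ∀ e ∈ l, p e = q e) :
    l.find? p = l.find? q := by
  induction l with
  | nil => rfl
  | cons a t ih =>
    simp only [List.find?]
    rw [h a List.mem_cons_self, ih (fun e he => h e (List.mem_cons_of_mem _ he))]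

theorem pv_main (seg : List Char) :
    (pvExts.find? (fun e => PySem.Chars.endswith seg e)).map String.ofList =
      (if seg.contains '.' then
        (if pvExts.contains ('.' :: (seg.reverse.takeWhile (fun c => c != '.')).reverse)
          then some (String.ofList ('.' :: (seg.reverse.takeWhile (fun c => c != '.')).reverse)) else none)
       else none) := by
  have hshape : ∀ e ∈ pvExts, e.head? = some '.' ∧ '.' ∉ e.tail := pv_exts_shape
  set t := (seg.reverse.takeWhile (fun c => c != '.')).reverse with ht
  by_cases hdot : '.' ∈ seg
  · have hc : seg.contains '.' = true := by simpa using hdot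
    have hcong : ∀ e ∈ pvExts, PySem.Chars.endswith seg e = (('.' :: t) == e) := by
      intro e he
      obtain ⟨hh, htl⟩ := hshape e he
      cases e with
      | nil => simp at hh
      | cons a r =>
        have ha : a = '.' := by simpa using hh
        subst ha
        have hiff := pv_endswith_ext seg r (by simpa using htl)
        by_cases hr : t = r
        · subst hr
          have : PySem.Chars.endswith seg ('.' :: t) = true := hiff.mpr ⟨hdot, ht.symm⟩
          simp [this]
        · have : PySem.Chars.endswith seg ('.' :: r) ≠ true := by
            intro hcontra
            exact hr (ht.trans (hiff.mp hcontra).2)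
          simp only [Bool.not_eq_true] at this
          simp [this, hr]
    rw [pv_find?_congr _ _ _ hcong, pv_find?_beq, hc]
    simp [apply_ite (Option.map String.ofList)]
  · have hc : seg.contains '.' = false := by simpa using hdot
    rw [hc]
    simp only [if_false, Bool.false_eq_true]
    rw [List.find?_eq_none.mpr, Option.map_none]
    intro e he
    obtain ⟨hh, htl⟩ := hshape e he
    cases e with
    | nil => simp at hh
    | cons a r =>
      have ha : a = '.' := by simpa using hh
      subst ha
      intro hcontra
      have := (pv_endswith_ext seg r (by simpa using htl)).mp hcontra
      exact hdot this.1

-- ---- split('?')[0] / split('#')[0] = takeWhile ----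

theorem pv_go_acc (sep : List Char) (fuel : Nat) :
    ∀ (l cur : List Char) (acc : List (List Char)),
      ∃ L, PySem.Chars.splitOn.go sep fuel l cur acc = (L ++ acc).reverse := by
  induction fuel with
  | zero =>
    intro l cur acc
    exact ⟨[cur.reverse ++ l], by simp [PySem.Chars.splitOn.go]⟩
  | succ fuel ih =>
    intro l cur acc
    cases l with
    | nil => exact ⟨[cur.reverse], by simp [PySem.Chars.splitOn.go]⟩
    | cons c rest =>
      by_cases hp : sep.isPrefixOf (c :: rest) = true
      · obtain ⟨L, hL⟩ := ih (List.drop sep.length (c :: rest)) [] (cur.reverse :: acc)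
        exact ⟨L ++ [cur.reverse], by simp [PySem.Chars.splitOn.go, hp, hL]⟩
      · obtain ⟨L, hL⟩ := ih rest (c :: cur) acc
        exact ⟨L, by simp [PySem.Chars.splitOn.go, hp, hL]⟩

theorem pv_go_head (c : Char) (fuel : Nat) :
    ∀ (l cur : List Char), l.length ≤ fuel →
      (PySem.Chars.splitOn.go [c] fuel l cur []).headD [] =
        cur.reverse ++ l.takeWhile (fun a => a != c) := by
  induction fuel with
  | zero =>
    intro l cur h
    have : l = [] := List.eq_nil_of_length_eq_zero (Nat.le_zero.mp h)
    subst this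
    simp [PySem.Chars.splitOn.go]
  | succ fuel ih =>
    intro l cur h
    cases l with
    | nil => simp [PySem.Chars.splitOn.go]
    | cons a rest =>
      by_cases hp : ([c].isPrefixOf (a :: rest)) = true
      · have ha : c = a := by simpa [List.isPrefixOf] using hp
        subst ha
        obtain ⟨L, hL⟩ := pv_go_acc [c] fuel (List.drop 1 (c :: rest)) [] ([] ++ [cur.reverse])
        simp only [PySem.Chars.splitOn.go, hp, if_true]
        have h2 : PySem.Chars.splitOn.go [c] fuel (List.drop [c].length (c :: rest)) [] [cur.reverse]
            = (L ++ [cur.reverse]).reverse := by simpa using hL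
        rw [h2]
        simp
      · have ha : a ≠ c := by
          intro hac; exact hp (by simp [List.isPrefixOf, hac])
        simp only [PySem.Chars.splitOn.go, hp, Bool.false_eq_true, if_false]
        rw [ih rest (a :: cur) (by simpa using Nat.le_of_succ_le_succ (by simpa using h))]
        simp [ha]

theorem pv_splitOn_head (l : List Char) (c : Char) :
    (PySem.Chars.splitOn l [c]).headD [] = l.takeWhile (fun a => a != c) := by
  unfold PySem.Chars.splitOn
  exact pv_go_head c (l.length + 1) l [] (Nat.le_succ _)

-- ---- B-side: the loop stops exactly at the first '?'/'#' ----

theorem pv_loop_trunc (l : List Char) :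
    ∀ (n : Nat) (e : Option (List Char)),
      pvAltLoop l n e = pvAltLoop (l.takeWhile (fun a => (a != '?') && (a != '#'))) n e := by
  induction l with
  | nil => intro n e; rfl
  | cons c rest ih =>
    intro n e
    by_cases hb : (c == '?' || c == '#') = true
    · have : ((c != '?') && (c != '#')) = false := by
        rcases Bool.or_eq_true_iff.mp hb with h | h <;> simp_all
      simp [pvAltLoop, hb, this]
    · have : ((c != '?') && (c != '#')) = true := by
        simp only [Bool.or_eq_true_iff] at hb
        simp_all
      simp only [pvAltLoop, hb, Bool.false_eq_true, if_false, List.takeWhile_cons, this, if_true]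
      by_cases hc : (c == '/') = true
      · simp [hc, ih]
      · simp [hc, ih]

-- ---- B-side invariant: the loop computes the last segment's length and extension ----

def pvSegOf (x : List Char) : List Char := (x.reverse.takeWhile (fun c => c != '/')).reverse

def pvExtOf (seg : List Char) : Option (List Char) :=
  if seg.contains '.' then some ('.' :: (seg.reverse.takeWhile (fun c => c != '.')).reverse)
  else none

theorem pv_segOf_no_slash (x : List Char) (h : '/' ∉ x) : pvSegOf x = x := by
  unfold pvSegOf
  rw [List.takeWhile_eq_self_iff.mpr, List.reverse_reverse]
  intro a ha
  have : a ≠ '/' := fun hc => h (hc ▸ (List.mem_reverse.mp ha))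
  simpa using this

theorem pv_segOf_slash (x rest : List Char) : pvSegOf (x ++ '/' :: rest) = pvSegOf rest := by
  unfold pvSegOf
  have : (x ++ '/' :: rest).reverse = rest.reverse ++ '/' :: x.reverse := by simp
  rw [this, List.takeWhile_append]
  split_ifs with h
  · have h2 := (List.takeWhile_prefix (p := fun c => c != '/') (l := rest.reverse)).eq_of_length h
    rw [h2]
    simp
  · rfl

theorem pv_ext_step (seg : List Char) (c : Char) :
    pvExtOf (seg ++ [c]) = (if c == '.' then some ['.'] else (pvExtOf seg).map (· ++ [c])) := by
  unfold pvExtOf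
  by_cases hc : c = '.'
  · subst hc
    simp
  · have hcb : (c == '.') = false := by simpa using hc
    rw [hcb]
    simp only [Bool.false_eq_true, if_false]
    by_cases hd : seg.contains '.' = true
    · have hd2 : (seg ++ [c]).contains '.' = true := by simp_all
      rw [hd, hd2]
      simp only [if_true]
      have h3 : (seg ++ [c]).reverse = c :: seg.reverse := by simp
      rw [h3, List.takeWhile_cons, if_pos (by simpa using hc)]
      simp
    · simp only [Bool.not_eq_true] at hd
      have hdm : '.' ∉ seg := by simpa using hd
      simp [hdm, Ne.symm hc]

theorem pv_loop_inv' (l : List Char) :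
    ∀ (seg : List Char), '/' ∉ seg → (∀ a ∈ l, a ≠ '?' ∧ a ≠ '#') →
      pvAltLoop l seg.length (pvExtOf seg) =
        ((pvSegOf (seg ++ l)).length, pvExtOf (pvSegOf (seg ++ l))) := by
  induction l with
  | nil =>
    intro seg hs _
    simp [pvAltLoop, pv_segOf_no_slash seg hs]
  | cons c rest ih =>
    intro seg hs hl
    obtain ⟨hq, hh⟩ := hl c List.mem_cons_self
    have hrest : ∀ a ∈ rest, a ≠ '?' ∧ a ≠ '#' := fun a ha => hl a (List.mem_cons_of_mem _ ha)
    have hb : (c == '?' || c == '#') = false := by simp [hq, hh]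
    by_cases hc : c = '/'
    · subst hc
      simp only [pvAltLoop, hb, Bool.false_eq_true, if_false]
      rw [if_pos (by decide)]
      have h0 : pvAltLoop rest 0 none = ((pvSegOf rest).length, pvExtOf (pvSegOf rest)) := by
        simpa [pvExtOf] using ih [] (by simp) hrest
      rw [h0, pv_segOf_slash seg rest]
    · have hcb : (c == '/') = false := by simpa using hc
      simp only [pvAltLoop, hb, Bool.false_eq_true, if_false, hcb]
      have hstep : (if c == '.' then some ['.'] else (pvExtOf seg).map (· ++ [c]))
          = pvExtOf (seg ++ [c]) := (pv_ext_step seg c).symm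
      rw [hstep]
      have hlen : seg.length + 1 = (seg ++ [c]).length := by simp
      have hns : '/' ∉ seg ++ [c] := by
        intro hmem
        rcases List.mem_append.mp hmem with h | h
        · exact hs h
        · exact hc (List.mem_singleton.mp h).symm
      rw [hlen, ih (seg ++ [c]) hns hrest]
      simp

-- membership in the two extension-list literals agrees (same 14 elements)
theorem pv_extsB_mem_iff (x : List Char) : x ∈ pvExtsB ↔ x ∈ pvExts :=
  (by decide : pvExtsB.Perm pvExts).mem_iff

-- the two helper pipelines compute the same last segment
theorem pv_lastSeg_eq (s : String) :
    pvLastSeg s = pvSegOf ((s.toList.takeWhile (fun a => a != '?')).takeWhile (fun a => a != '#')) := by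
  unfold pvLastSeg pvSegOf
  rw [pv_splitOn_head, pv_splitOn_head]

-- ===== VERDICT helper: full equality =====
set_option maxHeartbeats 1000000 in
theorem pv_full (s : String) :
    detect_suspicious_extension_py s = detect_suspicious_extension_py_alt s := by
  unfold detect_suspicious_extension_py detect_suspicious_extension_py_alt
  set p := (s.toList.takeWhile (fun a => a != '?')).takeWhile (fun a => a != '#') with hp
  have hpl : ∀ a ∈ p, a ≠ '?' ∧ a ≠ '#' := by
    intro a ha
    have h2 : a ∈ s.toList.takeWhile (fun a => a != '?') :=
      ((List.takeWhile_prefix _).sublist.subset) ha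
    constructor
    · have := List.mem_takeWhile_imp h2; simpa using this
    · have := List.mem_takeWhile_imp ha; simpa using this
  have hseg : pvLastSeg s = pvSegOf p := pv_lastSeg_eq s
  have htw : s.toList.takeWhile (fun a => (a != '?') && (a != '#')) = p := by
    rw [hp, List.takeWhile_takeWhile]
    congr 1
    funext a
    by_cases h1 : a = '?' <;> by_cases h2 : a = '#' <;> simp [h1, h2]
  have hloop : pvAltLoop s.toList 0 none = ((pvSegOf p).length, pvExtOf (pvSegOf p)) := by
    rw [pv_loop_trunc, htw]
    have h0 := pv_loop_inv' p [] (by simp) hpl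
    simpa [pvExtOf] using h0
  rw [hloop]
  set seg := pvSegOf p with hsg
  rw [hseg]
  by_cases hnil : seg = []
  · simp [hnil]
  · have hne : seg.length ≠ 0 := by simpa [List.length_eq_zero_iff] using hnil
    simp only [if_neg hnil, if_neg hne]
    rw [pv_main seg]
    unfold pvExtOf
    by_cases hd : '.' ∈ seg
    · have hc1 : seg.contains '.' = true := by simpa using hd
      rw [hc1]
      simp [pv_extsB_mem_iff]
    · have hc1 : seg.contains '.' = false := by simpa using hd
      rw [hc1]
      simp

-- ===== VERDICT (by name: the statement is the Claim_ definition above) =====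
theorem detect_suspicious_extension_py_spec : Claim_equal_detect_suspicious_extension_py := by
  intro s _
  unfold Spec_detect_suspicious_extension_py
  exact pv_full s
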